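-- pv_equiv track=rewrite | github.com/arsamigullin/problem_solving_python | leet/google/strings_and_arrays/campus_bikes_II.py | assignBikes
-- ===== SOURCE A (Python) =====
-- import typing
-- from functools import lru_cache
--
-- List = typing.List
--
-- def assignBikes(workers: List[List[int]], bikes: List[List[int]]) -> int:
--
--     # precompute distances
--     dists = [[] for _ in range(len(workers))]
--     for i, worker in enumerate(workers):
--         for j, bike in enumerate(bikes):
--             dist = abs(worker[0] - bike[0]) + abs(worker[1] - bike[1])
--             dists[i].append(dist)
--
--     @lru_cache(None)
--     def rec(i, visited):
--         if i == len(workers):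
--             return 0
--
--         sum_ = float('inf')
--         for bike in range(len(bikes)):
--             if not (visited & (1 << bike)):
--                 visited |= (1 << bike)
--                 dist = dists[i][bike]
--                 sum_ = min(sum_, dist + rec(i + 1, visited))
--                 visited &= ~(1 << bike)
--         return sum_
--
--     visited = 0
--
--     return rec(0, visited)
-- ===== SOURCE B (Python) =====
-- def assignBikes(workers, bikes):
--     m = len(bikes)
--     dist = [[abs(w[0] - b[0]) + abs(w[1] - b[1]) for b in bikes] for w in workers]
--     dp = {0: 0}
--     for row in dist:
--         ndp = {}
--         for mask, c in dp.items():
--             for j in range(m):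
--                 bit = 1 << j
--                 if not mask & bit:
--                     nm = mask | bit
--                     v = c + row[j]
--                     if nm not in ndp or v < ndp[nm]:
--                         ndp[nm] = v
--         dp = ndp
--     return min(dp.values())
-- ===== Notes on version B (the rewrite author's own statement) =====
-- stated objective: alternative
-- what changed: Replaces A's memoized top-down DFS over (worker index, visited-bikes bitmask) states by a bottom-up layered DP: one dictionary per worker mapping each used-bikes mask to the cheapest assignment cost, finishing with min over the last layer's values.
-- outside the precondition, e.g. on assignBikes([[0, 0]], []): A returns inf, B raises ValueError
import Mathlib
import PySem

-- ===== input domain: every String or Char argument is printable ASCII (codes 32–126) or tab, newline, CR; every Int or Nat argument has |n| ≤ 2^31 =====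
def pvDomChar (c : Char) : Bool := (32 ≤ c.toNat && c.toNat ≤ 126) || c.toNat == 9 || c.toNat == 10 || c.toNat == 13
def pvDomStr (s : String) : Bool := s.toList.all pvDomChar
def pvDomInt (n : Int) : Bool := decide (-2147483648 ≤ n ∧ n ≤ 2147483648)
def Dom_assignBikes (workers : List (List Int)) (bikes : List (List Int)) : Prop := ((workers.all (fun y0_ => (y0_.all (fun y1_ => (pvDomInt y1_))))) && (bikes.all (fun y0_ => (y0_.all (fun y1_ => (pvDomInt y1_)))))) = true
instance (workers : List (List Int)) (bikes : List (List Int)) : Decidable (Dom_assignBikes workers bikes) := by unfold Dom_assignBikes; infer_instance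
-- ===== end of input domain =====

-- B replaces A's memoized top-down DFS over (worker, visited-bitmask) states by a bottom-up
-- layered dictionary DP (one dict per worker: mask of used bikes ↦ cheapest cost); alternative
-- algorithm of the same exact value on the stated domain.

-- ===== PORT A =====
-- |worker[0]-bike[0]| + |worker[1]-bike[1]|; list indexing via getD, exact for rows of length ≥ 2 (Pre_)
def pvDist (w b : List Int) : Int := |w.getD 0 0 - b.getD 0 0| + |w.getD 1 0 - b.getD 1 0|

-- min with none = float('inf')
def pvOMin : Option Int → Option Int → Option Int
  | none, b => b
  | some x, none => some x
  | some x, some y => some (min x y)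

-- A's rec(i, visited), indexed by k = len(workers) - i remaining workers (i = n - k);
-- none models the float('inf') that rec returns when no bike is free.
def pvRecA (dists : List (List Int)) (m n : Nat) : Nat → Nat → Option Int
  | 0, _ => some 0
  | k+1, visited =>
    (List.range m).foldl
      (fun sum_ bike =>
        if visited.testBit bike then sum_
        else pvOMin sum_ ((pvRecA dists m n k (visited ||| (1 <<< bike))).map
              (fun r => (dists.getD (n - (k+1)) []).getD bike 0 + r)))
      none

def assignBikes (workers : List (List Int)) (bikes : List (List Int)) : Int :=
  let dists := workers.map (fun worker => bikes.foldl (fun row bike => row ++ [pvDist worker bike]) [])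
  -- Python returns float('inf') (not an int) when rec finds no free bike; that case is outside Pre_
  (pvRecA dists bikes.length workers.length workers.length 0).getD 0

-- ===== PORT B =====
-- 'if nm not in ndp or v < ndp[nm]: ndp[nm] = v'
def pvMinIns (d : PySem.Dict Nat Int) (nm : Nat) (v : Int) : PySem.Dict Nat Int :=
  if ¬ d.contains nm = true ∨ v < d.getD nm 0 then d.insert nm v else d

def assignBikes_alt (workers : List (List Int)) (bikes : List (List Int)) : Int :=
  let m := bikes.length
  let dist := workers.map (fun w => bikes.map (fun b => pvDist w b))
  let dp0 : PySem.Dict Nat Int := PySem.Dict.insert PySem.Dict.empty 0 0   -- {0: 0}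
  let final := dist.foldl
    (fun dp row =>
      dp.items.foldl
        (fun ndp mc =>
          (List.range m).foldl
            (fun ndp j =>
              if mc.1 &&& (1 <<< j) = 0 then
                pvMinIns ndp (mc.1 ||| (1 <<< j)) (mc.2 + row.getD j 0)
              else ndp)
            ndp)
        PySem.Dict.empty)
    dp0
  -- Python's min(dp.values()) raises ValueError on an empty dict; that case is outside Pre_
  (PySem.List.min? final.values (fun y => y)).getD 0

-- ===== PRECONDITION & SPEC =====
-- Pre_ excludes inputs where A raises IndexError (a worker/bike coordinate list with fewer than
-- 2 entries that the distance loop reaches) and inputs with more workers than bikes, on which A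
-- returns float('inf') — not an int — while B's min() over an empty dict raises ValueError.
def Pre_assignBikes (workers : List (List Int)) (bikes : List (List Int)) : Prop :=
  workers.length ≤ bikes.length ∧ (∀ w ∈ workers, 2 ≤ w.length) ∧
    (workers = [] ∨ ∀ b ∈ bikes, 2 ≤ b.length)
instance (workers : List (List Int)) (bikes : List (List Int)) : Decidable (Pre_assignBikes workers bikes) := by unfold Pre_assignBikes; infer_instance

def pvWitness_assignBikes : List (List Int) × List (List Int) := ([[0, 0], [2, 1]], [[1, 2], [3, 3]])

def Spec_assignBikes (workers : List (List Int)) (bikes : List (List Int)) (out : Int) : Prop := out = assignBikes_alt workers bikes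
instance (workers : List (List Int)) (bikes : List (List Int)) (out : Int) : Decidable (Spec_assignBikes workers bikes out) := by unfold Spec_assignBikes; infer_instance

-- ===== CLAIM (what is proved, stated in full; the proofs are below) =====
def Claim_equal_assignBikes : Prop := ∀ (workers : List (List Int)) (bikes : List (List Int)), Dom_assignBikes workers bikes → Pre_assignBikes workers bikes → Spec_assignBikes workers bikes (assignBikes workers bikes)

-- ===== LEMMAS AND PROOFS =====

-- min of a list of ints as an Option (none = empty), the common spec both ports reduce to
def pvMinL : List Int → Option Int
  | [] => none
  | x :: t => pvOMin (some x) (pvMinL t)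

-- cost of assigning bikes p to workers i, i+1, … (cost of the Python perm-suffix)
def pvCostR (dist : List (List Int)) : Nat → List Nat → Int
  | _, [] => 0
  | i, j :: r => (dist.getD i []).getD j 0 + pvCostR dist (i+1) r

-- all orderings (length-k sequences of distinct bike indices < m avoiding visited)
def pvPermsM (m : Nat) : Nat → Nat → List (List Nat)
  | 0, _ => [[]]
  | k+1, vis => (List.range m).flatMap
      (fun j => if vis.testBit j then [] else (pvPermsM m k (vis ||| (1 <<< j))).map (j :: ·))

-- bitmask of a list of bike indices
def pvMask : List Nat → Nat
  | [] => 0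
  | j :: r => pvMask r ||| (1 <<< j)

-- ----- generic pvOMin / pvMinL facts -----
theorem pvOMin_none_right (a : Option Int) : pvOMin a none = a := by cases a <;> rfl

theorem pvOMin_assoc (a b c : Option Int) : pvOMin (pvOMin a b) c = pvOMin a (pvOMin b c) := by
  cases a <;> cases b <;> cases c <;> simp [pvOMin, min_assoc]

theorem pvMinL_eq_none_iff (l : List Int) : pvMinL l = none ↔ l = [] := by
  cases l with
  | nil => simp [pvMinL]
  | cons x t => simp [pvMinL]; cases pvMinL t <;> simp [pvOMin]

theorem pvMinL_mem {l : List Int} {w : Int} (h : pvMinL l = some w) : w ∈ l := by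
  induction l with
  | nil => simp [pvMinL] at h
  | cons x t ih =>
    simp [pvMinL] at h
    cases ht : pvMinL t with
    | none => rw [ht] at h; simp [pvOMin] at h; simp [h]
    | some y =>
      rw [ht] at h; simp [pvOMin] at h
      rcases le_total x y with hxy | hxy
      · exact List.mem_cons.mpr (Or.inl (by omega))
      · refine List.mem_cons.mpr (Or.inr ?_)
        have hw : w = y := by omega
        exact ih (by rw [hw]; exact ht)
  
theorem pvMinL_isMin {l : List Int} {w : Int} (h : pvMinL l = some w) : ∀ y ∈ l, w ≤ y := by
  induction l generalizing w with
  | nil => simp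
  | cons x t ih =>
    intro y hy
    simp [pvMinL] at h
    cases ht : pvMinL t with
    | none =>
      rw [ht] at h; simp [pvOMin] at h
      have : t = [] := (pvMinL_eq_none_iff t).mp ht
      subst this; simp at hy; omega
    | some z =>
      rw [ht] at h; simp [pvOMin] at h
      rcases List.mem_cons.mp hy with rfl | hyt
      · omega
      · have := ih ht y hyt; omega

theorem pvMinL_le_mem {l : List Int} {v : Int} (h : v ∈ l) : ∃ w, pvMinL l = some w ∧ w ≤ v := by
  cases hl : pvMinL l with
  | none => rw [pvMinL_eq_none_iff] at hl; subst hl; simp at h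
  | some w => exact ⟨w, rfl, pvMinL_isMin hl v h⟩

-- min over lists in which every element of each is dominated by an element of the other
theorem pvMinL_eq_of_dominates {l₁ l₂ : List Int}
    (h₁ : ∀ x ∈ l₁, ∃ y ∈ l₂, y ≤ x) (h₂ : ∀ y ∈ l₂, ∃ x ∈ l₁, x ≤ y) :
    pvMinL l₁ = pvMinL l₂ := by
  cases hl1 : pvMinL l₁ with
  | none =>
    rw [pvMinL_eq_none_iff] at hl1; subst hl1
    cases hl2 : pvMinL l₂ with
    | none => rfl
    | some w =>
      have := pvMinL_mem hl2
      obtain ⟨x, hx, -⟩ := h₂ _ this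
      simp at hx
  | some w₁ =>
    cases hl2 : pvMinL l₂ with
    | none =>
      rw [pvMinL_eq_none_iff] at hl2; subst hl2
      have := pvMinL_mem hl1
      obtain ⟨y, hy, -⟩ := h₁ _ this
      simp at hy
    | some w₂ =>
      congr 1
      obtain ⟨y, hy, hyle⟩ := h₁ _ (pvMinL_mem hl1)
      obtain ⟨x, hx, hxle⟩ := h₂ _ (pvMinL_mem hl2)
      have h1 := pvMinL_isMin hl1 x hx
      have h2 := pvMinL_isMin hl2 y hy
      omega

theorem pvMinL_append (l₁ l₂ : List Int) : pvMinL (l₁ ++ l₂) = pvOMin (pvMinL l₁) (pvMinL l₂) := by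
  induction l₁ with
  | nil => simp [pvMinL, pvOMin]
  | cons x t ih => simp [pvMinL, ih, pvOMin_assoc]

theorem foldl_pvOMin_hoist (l : List Nat) (g : Nat → Option Int) (s : Option Int) :
    l.foldl (fun s x => pvOMin s (g x)) s = pvOMin s (l.foldl (fun s x => pvOMin s (g x)) none) := by
  induction l generalizing s with
  | nil => simp [pvOMin_none_right]
  | cons a t ih =>
    simp only [List.foldl_cons]
    rw [ih (pvOMin s (g a)), ih (pvOMin none (g a)), pvOMin_assoc]
    rfl

theorem pvMinL_flatMap (l : List Nat) (f : Nat → List Int) :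
    pvMinL (l.flatMap f) = l.foldl (fun s x => pvOMin s (pvMinL (f x))) none := by
  induction l with
  | nil => simp [pvMinL]
  | cons a t ih =>
    simp only [List.flatMap_cons, List.foldl_cons, pvMinL_append, ih]
    exact (foldl_pvOMin_hoist t (fun x => pvMinL (f x)) (pvMinL (f a))).symm

theorem pvMinL_map_add (l : List (List Nat)) (c : Int) (g : List Nat → Int) :
    pvMinL (l.map (fun x => c + g x)) = (pvMinL (l.map g)).map (fun r => c + r) := by
  induction l with
  | nil => simp [pvMinL]
  | cons a t ih =>
    simp only [List.map_cons, pvMinL, ih]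
    cases pvMinL (t.map g) with
    | none => rfl
    | some y =>
      show pvOMin (some (c + g a)) (some (c + y)) = some (c + min (g a) y)
      simp [pvOMin]

theorem foldl_min_eq_pvMinL (t : List Int) : ∀ x, some (t.foldl min x) = pvOMin (some x) (pvMinL t) := by
  induction t with
  | nil => intro x; rfl
  | cons a t ih =>
    intro x
    simp only [List.foldl_cons, pvMinL]
    rw [ih (min x a), ← pvOMin_assoc]
    rfl

theorem pvMinL_eq_min? (l : List Int) : PySem.List.min? l (fun y => y) = pvMinL l := by
  cases l with
  | nil => exact (PySem.List.min?_eq_none_iff [] _).mpr rfl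
  | cons x t => rw [PySem.List.min?_id_cons, foldl_min_eq_pvMinL]; rfl

-- ----- bit facts -----
theorem pv_band_two_pow_eq_zero (n j : Nat) : n &&& (1 <<< j) = 0 ↔ n.testBit j = false := by
  rw [Nat.one_shiftLeft]
  constructor
  · intro h
    have := congrArg (fun x => x.testBit j) h
    simpa [Nat.testBit_and, Nat.testBit_two_pow] using this
  · intro h
    apply Nat.eq_of_testBit_eq
    intro i
    simp only [Nat.testBit_and, Nat.testBit_two_pow, Nat.zero_testBit, Bool.and_eq_false_iff]
    by_cases hij : j = i
    · subst hij; left; exact h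
    · right; simpa using hij

theorem pv_testBit_or_pow (vis j x : Nat) :
    (vis ||| (1 <<< j)).testBit x = (vis.testBit x || decide (j = x)) := by
  rw [Nat.testBit_or, Nat.one_shiftLeft, Nat.testBit_two_pow]

theorem pvMask_testBit (p : List Nat) (x : Nat) : (pvMask p).testBit x = decide (x ∈ p) := by
  induction p with
  | nil => simp [pvMask]
  | cons j r ih =>
    simp [pvMask, Nat.testBit_or, ih, Nat.one_shiftLeft, Nat.testBit_two_pow]
    by_cases h : x ∈ r <;> by_cases h2 : x = j <;> simp [h, h2, eq_comm]

theorem pvMask_append (p : List Nat) (j : Nat) : pvMask (p ++ [j]) = pvMask p ||| (1 <<< j) := by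
  induction p with
  | nil => simp [pvMask]
  | cons a r ih => simp [pvMask, ih, Nat.or_assoc, Nat.or_comm (1 <<< j) (1 <<< a)]

-- ----- perms characterization -----
theorem mem_pvPermsM (m : Nat) : ∀ (k vis : Nat) (p : List Nat),
    p ∈ pvPermsM m k vis ↔
      p.length = k ∧ p.Nodup ∧ ∀ x ∈ p, x < m ∧ vis.testBit x = false := by
  intro k
  induction k with
  | zero =>
    intro vis p
    simp only [pvPermsM, List.mem_singleton, List.length_eq_zero_iff]
    constructor
    · rintro rfl; simp
    · rintro ⟨rfl, -, -⟩; rfl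
  | succ k ih =>
    intro vis p
    simp only [pvPermsM, List.mem_flatMap, List.mem_range]
    constructor
    · rintro ⟨j, hj, hp⟩
      by_cases hv : vis.testBit j = true
      · rw [if_pos hv] at hp; simp at hp
      · rw [if_neg hv] at hp
        obtain ⟨q, hq, rfl⟩ := List.mem_map.mp hp
        obtain ⟨hlen, hnd, hall⟩ := (ih (vis ||| (1 <<< j)) q).mp hq
        refine ⟨by simp [hlen], ?_, ?_⟩
        · rw [List.nodup_cons]
          refine ⟨fun hjq => ?_, hnd⟩
          have := (hall j hjq).2
          rw [pv_testBit_or_pow] at this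
          simp at this
        · intro x hx
          rcases List.mem_cons.mp hx with rfl | hxq
          · exact ⟨hj, by simpa using hv⟩
          · have h2 := (hall x hxq).2
            rw [pv_testBit_or_pow] at h2
            simp only [Bool.or_eq_false_iff] at h2
            exact ⟨(hall x hxq).1, h2.1⟩
    · rintro ⟨hlen, hnd, hall⟩
      cases p with
      | nil => simp at hlen
      | cons j q =>
        refine ⟨j, (hall j (by simp)).1, ?_⟩
        have hv : vis.testBit j = false := (hall j (by simp)).2
        rw [if_neg (by simp [hv])]
        refine List.mem_map.mpr ⟨q, ?_, rfl⟩
        rw [ih]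
        refine ⟨by simpa using hlen, (List.nodup_cons.mp hnd).2, ?_⟩
        intro x hx
        refine ⟨(hall x (by simp [hx])).1, ?_⟩
        rw [pv_testBit_or_pow]
        have h1 : vis.testBit x = false := (hall x (by simp [hx])).2
        have h2 : j ≠ x := fun h => (List.nodup_cons.mp hnd).1 (h ▸ hx)
        simp [h1, h2]

theorem pvCostR_append (dist : List (List Int)) (p : List Nat) (j : Nat) : ∀ i,
    pvCostR dist i (p ++ [j]) = pvCostR dist i p + (dist.getD (i + p.length) []).getD j 0 := by
  induction p with
  | nil => intro i; simp [pvCostR]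
  | cons a r ih =>
    intro i
    simp [pvCostR, ih (i+1)]
    rw [show i + (r.length + 1) = i + 1 + r.length by omega]
    ring

-- ----- A-side: rec computes the min over all orderings -----
theorem pvRecA_eq_minL (dist : List (List Int)) (m n : Nat) :
    ∀ k vis, k ≤ n →
      pvRecA dist m n k vis = pvMinL ((pvPermsM m k vis).map (pvCostR dist (n - k))) := by
  intro k
  induction k with
  | zero => intro vis _; simp [pvRecA, pvPermsM, pvCostR, pvMinL, pvOMin_none_right]
  | succ k ih =>
    intro vis hk
    rw [pvRecA]
    have hbody : (fun (sum_ : Option Int) (bike : Nat) =>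
        if vis.testBit bike then sum_
        else pvOMin sum_ ((pvRecA dist m n k (vis ||| (1 <<< bike))).map
              (fun r => (dist.getD (n - (k+1)) []).getD bike 0 + r)))
      = (fun (sum_ : Option Int) (bike : Nat) =>
        pvOMin sum_ (if vis.testBit bike then none
          else ((pvRecA dist m n k (vis ||| (1 <<< bike))).map
              (fun r => (dist.getD (n - (k+1)) []).getD bike 0 + r)))) := by
      funext s bike
      split_ifs with h
      · exact (pvOMin_none_right s).symm
      · rfl
    rw [hbody]
    have hperm : (pvPermsM m (k+1) vis).map (pvCostR dist (n - (k+1)))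
        = (List.range m).flatMap (fun j =>
            (if vis.testBit j then [] else (pvPermsM m k (vis ||| (1 <<< j))).map (j :: ·)).map
              (pvCostR dist (n - (k+1)))) := by
      rw [pvPermsM, List.map_flatMap]
    rw [hperm, pvMinL_flatMap]
    apply PySem.List.foldl_congr_mem
    intro s j _
    congr 1
    split_ifs with h
    · simp [pvMinL]
    · rw [List.map_map]
      have hco : (pvCostR dist (n - (k+1)) ∘ (j :: ·))
          = fun p => (dist.getD (n - (k+1)) []).getD j 0 + pvCostR dist (n - k) p := by
        funext p
        show pvCostR dist (n - (k+1)) (j :: p) = _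
        rw [pvCostR]
        congr 2
        omega
      rw [hco, pvMinL_map_add, ih (vis ||| (1 <<< j)) (by omega)]

-- ----- B-side -----
theorem get?_pvMinIns (d : PySem.Dict Nat Int) (nm : Nat) (v : Int) (k : Nat) :
    (pvMinIns d nm v).get? k = if k = nm then pvOMin (d.get? nm) (some v) else d.get? k := by
  by_cases hk : k = nm
  · rw [hk, if_pos rfl]
    unfold pvMinIns
    cases hg : d.get? nm with
    | none =>
      have hc : d.contains nm = false := by rw [PySem.Dict.contains_eq_isSome_get?, hg]; rfl
      rw [if_pos (Or.inl (by simp [hc]))]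
      rw [PySem.Dict.get?_insert]
      simp [pvOMin]
    | some w =>
      have hc : d.contains nm = true := by rw [PySem.Dict.contains_eq_isSome_get?, hg]; rfl
      have hgd : d.getD nm 0 = w := by rw [PySem.Dict.getD_eq_get?_getD, hg]; rfl
      by_cases hv : v < w
      · rw [if_pos (Or.inr (by rw [hgd]; exact hv))]
        rw [PySem.Dict.get?_insert, if_pos rfl]
        simp only [pvOMin]
        congr 1
        omega
      · rw [if_neg (by rw [hgd]; simp [hc, hv])]
        rw [hg]
        simp only [pvOMin]
        congr 1
        omega
  · rw [if_neg hk]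
    unfold pvMinIns
    split_ifs with h
    · rw [PySem.Dict.get?_insert]; simp [hk]
    · rfl

theorem keys_nodup_pvMinIns (d : PySem.Dict Nat Int) (nm : Nat) (v : Int)
    (h : d.keys.Nodup) : (pvMinIns d nm v).keys.Nodup := by
  unfold pvMinIns
  split_ifs
  · exact PySem.Dict.nodup_keys_insert d nm v h
  · exact h

theorem get?_foldl_pvMinIns (L : List (Nat × Int)) : ∀ (d : PySem.Dict Nat Int) (k : Nat),
    ((L.foldl (fun d p => pvMinIns d p.1 p.2) d).get? k)
      = pvOMin (d.get? k) (pvMinL ((L.filter (fun p => p.1 = k)).map (·.2))) := by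
  induction L with
  | nil => intro d k; simp [pvMinL, pvOMin_none_right]
  | cons p t ih =>
    intro d k
    simp only [List.foldl_cons]
    rw [ih (pvMinIns d p.1 p.2) k, get?_pvMinIns]
    by_cases hk : p.1 = k
    · rw [List.filter_cons_of_pos (by simp [hk])]
      simp only [List.map_cons, pvMinL]
      rw [if_pos hk.symm, hk, pvOMin_assoc]
    · rw [List.filter_cons_of_neg (by simp [hk])]
      rw [if_neg (fun hh => hk hh.symm)]

theorem keys_nodup_foldl_pvMinIns (L : List (Nat × Int)) : ∀ (d : PySem.Dict Nat Int),
    d.keys.Nodup → ((L.foldl (fun d p => pvMinIns d p.1 p.2) d).keys.Nodup) := by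
  induction L with
  | nil => intro d h; exact h
  | cons p t ih => intro d h; exact ih _ (keys_nodup_pvMinIns _ _ _ h)

-- the dict invariant: after i layers, dp maps each mask to the min cost of assigning
-- workers 0..i-1 to an ordering of exactly that mask's bikes
def pvInv (dist : List (List Int)) (m i : Nat) (d : PySem.Dict Nat Int) : Prop :=
  d.keys.Nodup ∧
  ∀ k : Nat, d.get? k =
    pvMinL (((pvPermsM m i 0).filter (fun p => pvMask p = k)).map (pvCostR dist 0))

theorem pv_nodup_snoc (p : List Nat) (j : Nat) : (p ++ [j]).Nodup ↔ p.Nodup ∧ j ∉ p := by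
  simp only [List.nodup_append, List.nodup_cons, List.not_mem_nil, not_false_iff, List.nodup_nil,
    and_true, true_and, List.forall_mem_singleton]
  constructor
  · rintro ⟨h1, h2⟩; exact ⟨h1, fun hj => h2 j hj rfl⟩
  · rintro ⟨h1, h2⟩; exact ⟨h1, fun a ha haj => h2 (haj ▸ ha)⟩

theorem pv_layer_step (dist : List (List Int)) (m i : Nat) (row : List Int)
    (hrow : dist.getD i [] = row) (d : PySem.Dict Nat Int) (hd : pvInv dist m i d) :
    pvInv dist m (i+1)
      (d.items.foldl
        (fun ndp mc =>
          (List.range m).foldl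
            (fun ndp j =>
              if mc.1 &&& (1 <<< j) = 0 then
                pvMinIns ndp (mc.1 ||| (1 <<< j)) (mc.2 + row.getD j 0)
              else ndp)
            ndp)
        PySem.Dict.empty) := by
  obtain ⟨hnd, hget⟩ := hd
  have hfold : (d.items.foldl
        (fun ndp mc =>
          (List.range m).foldl
            (fun ndp j =>
              if mc.1 &&& (1 <<< j) = 0 then
                pvMinIns ndp (mc.1 ||| (1 <<< j)) (mc.2 + row.getD j 0)
              else ndp)
            ndp)
        PySem.Dict.empty)
      = ((d.items.flatMap (fun mc =>
            ((List.range m).filter (fun j => decide (mc.1 &&& (1 <<< j) = 0))).map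
              (fun j => (mc.1 ||| (1 <<< j), mc.2 + row.getD j 0)))).foldl
          (fun dd p => pvMinIns dd p.1 p.2) PySem.Dict.empty) := by
    rw [List.foldl_flatMap]
    apply PySem.List.foldl_congr_mem
    intro acc mc _
    rw [List.foldl_map]
    exact PySem.List.foldl_ite_eq_foldl_filter (fun j => mc.1 &&& (1 <<< j) = 0)
      (fun ndp j => pvMinIns ndp (mc.1 ||| (1 <<< j)) (mc.2 + row.getD j 0)) (List.range m) acc
  rw [hfold]
  refine ⟨keys_nodup_foldl_pvMinIns _ _ (by rw [PySem.Dict.keys_empty]; exact List.nodup_nil), ?_⟩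
  intro k
  rw [get?_foldl_pvMinIns, PySem.Dict.get?_empty]
  have hnone : ∀ o : Option Int, pvOMin none o = o := fun o => rfl
  rw [hnone]
  -- membership description of the produced values with key k
  have hmemL : ∀ v : Int,
      v ∈ (((d.items.flatMap (fun mc =>
            ((List.range m).filter (fun j => decide (mc.1 &&& (1 <<< j) = 0))).map
              (fun j => (mc.1 ||| (1 <<< j), mc.2 + row.getD j 0)))).filter
                (fun p => p.1 = k)).map (·.2))
        ↔ ∃ mask c j, d.get? mask = some c ∧ j < m ∧ mask &&& (1 <<< j) = 0 ∧
            mask ||| (1 <<< j) = k ∧ v = c + row.getD j 0 := by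
    intro v
    simp only [List.mem_map, List.mem_filter, List.mem_flatMap, List.mem_range,
      decide_eq_true_eq]
    constructor
    · rintro ⟨pr, ⟨⟨mc, hmc, j, ⟨hjm, hband⟩, hje⟩, hfk⟩, rfl⟩
      subst hje
      exact ⟨mc.1, mc.2, j,
        (PySem.Dict.get?_eq_some_iff_mem_items d mc.1 mc.2 hnd).mpr (by simpa using hmc),
        hjm, hband, hfk, rfl⟩
    · rintro ⟨mask, c, j, hg, hjm, hband, hor, rfl⟩
      exact ⟨(mask ||| (1 <<< j), c + row.getD j 0),
        ⟨⟨(mask, c), PySem.Dict.mem_items_of_get?_eq_some d hg, j, ⟨hjm, hband⟩, rfl⟩, hor⟩, rfl⟩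
  apply pvMinL_eq_of_dominates
  · -- every produced value is the cost of some (i+1)-ordering with mask k
    intro x hx
    rw [hmemL] at hx
    obtain ⟨mask, c, j, hg, hjm, hband, hor, rfl⟩ := hx
    rw [hget mask] at hg
    obtain ⟨p, hpf, hpc⟩ := List.mem_map.mp (pvMinL_mem hg)
    obtain ⟨hpmem, hpmask⟩ := List.mem_filter.mp hpf
    have hpmask : pvMask p = mask := by simpa using hpmask
    obtain ⟨hlen, hnodup, hall⟩ := (mem_pvPermsM m i 0 p).mp hpmem
    have hjp : j ∉ p := by
      intro hjp
      have h1 : (pvMask p).testBit j = true := by rw [pvMask_testBit]; simpa using hjp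
      have h2 : mask.testBit j = false := (pv_band_two_pow_eq_zero mask j).mp hband
      rw [hpmask] at h1
      rw [h1] at h2
      simp at h2
    refine ⟨pvCostR dist 0 (p ++ [j]), List.mem_map.mpr ⟨p ++ [j], List.mem_filter.mpr ⟨?_, ?_⟩, rfl⟩, ?_⟩
    · rw [mem_pvPermsM]
      refine ⟨by simp [hlen], (pv_nodup_snoc p j).mpr ⟨hnodup, hjp⟩, ?_⟩
      intro x hx
      rcases List.mem_append.mp hx with hxp | hxj
      · exact ⟨(hall x hxp).1, Nat.zero_testBit x⟩
      · simp at hxj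
        subst hxj
        exact ⟨hjm, Nat.zero_testBit x⟩
    · simp only [decide_eq_true_eq]
      rw [pvMask_append, hpmask, hor]
    · exact le_of_eq (by rw [pvCostR_append, Nat.zero_add, hlen, hrow, hpc])
  · -- every (i+1)-ordering's cost is dominated by a produced value
    intro y hy
    obtain ⟨q, hqf, rfl⟩ := List.mem_map.mp hy
    obtain ⟨hqmem, hqmask⟩ := List.mem_filter.mp hqf
    have hqmask : pvMask q = k := by simpa using hqmask
    obtain ⟨hlen, hnodup, hall⟩ := (mem_pvPermsM m (i+1) 0 q).mp hqmem
    have hqne : q ≠ [] := by intro h; rw [h] at hlen; simp at hlen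
    have hqeq : q.dropLast ++ [q.getLast hqne] = q := List.dropLast_concat_getLast hqne
    set p := q.dropLast with hp
    set j := q.getLast hqne with hj
    have hplen : p.length = i := by rw [hp, List.length_dropLast, hlen]; omega
    have hpnd : p.Nodup := hnodup.sublist (List.dropLast_sublist q)
    have hjq : j ∈ q := List.getLast_mem hqne
    have hjp : j ∉ p := by
      have := (pv_nodup_snoc p j).mp (by rw [hqeq]; exact hnodup)
      exact this.2
    have hpmem : p ∈ pvPermsM m i 0 := by
      rw [mem_pvPermsM]
      exact ⟨hplen, hpnd, fun x hx => hall x ((List.dropLast_sublist q).mem hx)⟩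
    have hcmem : pvCostR dist 0 p ∈
        ((pvPermsM m i 0).filter (fun r => pvMask r = pvMask p)).map (pvCostR dist 0) :=
      List.mem_map.mpr ⟨p, List.mem_filter.mpr ⟨hpmem, by simp⟩, rfl⟩
    obtain ⟨c, hcsome, hcle⟩ := pvMinL_le_mem hcmem
    have hg : d.get? (pvMask p) = some c := by rw [hget (pvMask p)]; exact hcsome
    have hband : pvMask p &&& (1 <<< j) = 0 := by
      rw [pv_band_two_pow_eq_zero, pvMask_testBit]
      simpa using hjp
    have hor : pvMask p ||| (1 <<< j) = k := by
      rw [← pvMask_append, hqeq, hqmask]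
    refine ⟨c + row.getD j 0, (hmemL _).mpr ⟨pvMask p, c, j, hg, (hall j hjq).1, hband, hor, rfl⟩, ?_⟩
    have hcost : pvCostR dist 0 q = pvCostR dist 0 p + row.getD j 0 := by
      rw [← hqeq, pvCostR_append, Nat.zero_add, hplen, hrow]
    rw [hcost]
    omega

theorem pv_fold_layers (dist : List (List Int)) (m : Nat) :
    ∀ (t : List (List Int)) (i : Nat) (d : PySem.Dict Nat Int),
      dist.drop i = t → pvInv dist m i d →
      pvInv dist m (i + t.length)
        (t.foldl
          (fun dp row =>
            dp.items.foldl
              (fun ndp mc =>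
                (List.range m).foldl
                  (fun ndp j =>
                    if mc.1 &&& (1 <<< j) = 0 then
                      pvMinIns ndp (mc.1 ||| (1 <<< j)) (mc.2 + row.getD j 0)
                    else ndp)
                  ndp)
              PySem.Dict.empty)
          d) := by
  intro t
  induction t with
  | nil => intro i d _ h; simpa using h
  | cons row t ih =>
    intro i d hdrop h
    have hrow : dist.getD i [] = row := by
      have hg : dist[i]? = some row := by
        have h0 : (dist.drop i)[0]? = some row := by rw [hdrop]; rfl
        rw [List.getElem?_drop] at h0
        simpa using h0
      rw [List.getD_eq_getElem?_getD, hg]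
      rfl
    have hdrop' : dist.drop (i+1) = t := by
      have h1 : dist.drop (i+1) = (dist.drop i).drop 1 := by
        rw [List.drop_drop]
      rw [h1, hdrop]
      rfl
    have := ih (i+1) _ hdrop' (pv_layer_step dist m i row hrow d h)
    simpa [Nat.add_assoc, Nat.add_comm 1 t.length] using this

-- values ↔ get? for a nodup-keys dict
theorem pv_values_eq (d : PySem.Dict Nat Int) : d.values = d.items.map (fun p => p.2) := rfl

theorem pv_mem_values_iff (d : PySem.Dict Nat Int) (h : d.keys.Nodup) (v : Int) :
    v ∈ d.values ↔ ∃ k, d.get? k = some v := by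
  rw [pv_values_eq]
  constructor
  · intro hv
    obtain ⟨⟨k, w⟩, hm, hw⟩ := List.mem_map.mp hv
    refine ⟨k, ?_⟩
    have hw' : w = v := hw
    rw [← hw']
    exact PySem.Dict.get?_of_mem_items d hm h
  · rintro ⟨k, hk⟩
    exact List.mem_map.mpr ⟨(k, v), PySem.Dict.mem_items_of_get?_eq_some d hk, rfl⟩

theorem pv_inv0 (dist : List (List Int)) (m : Nat) :
    pvInv dist m 0 (PySem.Dict.insert PySem.Dict.empty 0 0) := by
  constructor
  · apply PySem.Dict.nodup_keys_insert
    rw [PySem.Dict.keys_empty]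
    exact List.nodup_nil
  · intro k
    rw [PySem.Dict.get?_insert]
    by_cases hk : k = 0
    · subst hk
      simp [pvPermsM, pvMask, pvCostR, pvMinL, pvOMin]
    · simp [pvPermsM, pvMask, Ne.symm hk, hk, pvMinL, PySem.Dict.get?_empty]

theorem pv_ports_agree (workers bikes : List (List Int)) :
    assignBikes workers bikes = assignBikes_alt workers bikes := by
  simp only [assignBikes, assignBikes_alt]
  have hdist : workers.map (fun worker => bikes.foldl (fun row bike => row ++ [pvDist worker bike]) [])
      = workers.map (fun w => bikes.map (fun b => pvDist w b)) := by
    apply List.map_congr_left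
    intro w _
    rw [PySem.List.foldl_append_singleton_eq_map]
    rfl
  rw [hdist]
  set dist := workers.map (fun w => bikes.map (fun b => pvDist w b)) with hdistdef
  set m := bikes.length with hm
  set n := workers.length with hn
  have hlen : dist.length = n := by rw [hdistdef, List.length_map, hn]
  have hA : pvRecA dist m n n 0 = pvMinL ((pvPermsM m n 0).map (pvCostR dist 0)) := by
    have h := pvRecA_eq_minL dist m n n 0 le_rfl
    rw [Nat.sub_self] at h
    exact h
  have hinvN := pv_fold_layers dist m dist 0 (PySem.Dict.insert PySem.Dict.empty 0 0) rfl
    (pv_inv0 dist m)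
  rw [Nat.zero_add, hlen] at hinvN
  obtain ⟨hndF, hgetF⟩ := hinvN
  rw [pvMinL_eq_min?]
  have hmin : pvMinL ((dist.foldl
      (fun dp row =>
        dp.items.foldl
          (fun ndp mc =>
            (List.range m).foldl
              (fun ndp j =>
                if mc.1 &&& (1 <<< j) = 0 then
                  pvMinIns ndp (mc.1 ||| (1 <<< j)) (mc.2 + row.getD j 0)
                else ndp)
              ndp)
          PySem.Dict.empty)
      (PySem.Dict.insert PySem.Dict.empty 0 0)).values)
      = pvMinL ((pvPermsM m n 0).map (pvCostR dist 0)) := by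
    apply pvMinL_eq_of_dominates
    · intro x hx
      obtain ⟨k, hk⟩ := (pv_mem_values_iff _ hndF x).mp hx
      rw [hgetF k] at hk
      obtain ⟨p, hpf, rfl⟩ := List.mem_map.mp (pvMinL_mem hk)
      exact ⟨_, List.mem_map.mpr ⟨p, (List.mem_filter.mp hpf).1, rfl⟩, le_rfl⟩
    · intro y hy
      obtain ⟨q, hq, rfl⟩ := List.mem_map.mp hy
      have hqm : pvCostR dist 0 q ∈
          ((pvPermsM m n 0).filter (fun p => pvMask p = pvMask q)).map (pvCostR dist 0) :=
        List.mem_map.mpr ⟨q, List.mem_filter.mpr ⟨hq, by simp⟩, rfl⟩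
      obtain ⟨c, hcsome, hcle⟩ := pvMinL_le_mem hqm
      have hgc : _ := hgetF (pvMask q)
      refine ⟨c, (pv_mem_values_iff _ hndF c).mpr ⟨pvMask q, ?_⟩, hcle⟩
      rw [hgc]
      exact hcsome
  rw [hmin, ← hA]

-- ===== VERDICT (by name: the statement is the Claim_ definition above) =====
theorem assignBikes_spec : Claim_equal_assignBikes := by
  intro workers bikes _ _
  exact pv_ports_agree workers bikes
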